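-- pv_equiv track=rewrite | github.com/samar-12-23/DSA_Regain | Max_XOR_Subarray_sum.py | maxSubarrayXOR
-- ===== SOURCE A (Python) =====
-- def maxSubarrayXOR(arr, k):
--     # code here
--     n=len(arr)
--     maxi_xor=0
--
--     for i in range(n-k+1):
--         curr_xor=0
--         for j in range(i,i+k):
--             curr_xor^=arr[j]
--
--         maxi_xor=max(maxi_xor,curr_xor)
--
--     return maxi_xor
-- ===== SOURCE B (Python) =====
-- def maxSubarrayXOR(arr, k):
--     n = len(arr)
--     if k <= 0 or n < k:
--         return 0
--     pre = [0]
--     for x in arr: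
--         pre.append(pre[-1] ^ x)
--     return max(0, max(p ^ q for p, q in zip(pre, pre[k:])))
-- ===== Notes on version B (the rewrite author's own statement) =====
-- stated objective: faster
-- what changed: Replaces A's O(n*k) per-window recomputation by a prefix-XOR list zipped against its own k-shift (each window XOR is pre[i]^pre[i+k]) and one max over that list, after a guard returning 0 for k<=0 or k>n exactly as A's empty loops do.
import Mathlib
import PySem

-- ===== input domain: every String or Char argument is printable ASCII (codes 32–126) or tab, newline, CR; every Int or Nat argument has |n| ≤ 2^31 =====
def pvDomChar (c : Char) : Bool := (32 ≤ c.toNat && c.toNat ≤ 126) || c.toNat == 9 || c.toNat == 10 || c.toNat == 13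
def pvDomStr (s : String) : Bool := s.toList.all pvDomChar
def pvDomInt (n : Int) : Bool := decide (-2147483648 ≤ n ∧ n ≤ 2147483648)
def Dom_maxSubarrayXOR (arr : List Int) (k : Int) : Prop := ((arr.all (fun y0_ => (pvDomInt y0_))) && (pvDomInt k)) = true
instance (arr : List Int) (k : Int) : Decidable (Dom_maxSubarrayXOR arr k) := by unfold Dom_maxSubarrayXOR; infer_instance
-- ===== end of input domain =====

-- B replaces A's O(n*k) per-window XOR recomputation by a prefix-XOR list zipped with its k-shift and one max; objective: faster (asymptotic).

-- ===== PORT A =====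
-- arr[j] is always in range when the inner loop runs (0 ≤ i and i+k ≤ n), so pyGetD's default is never used
def maxSubarrayXOR (arr : List Int) (k : Int) : Int :=
  let n : Int := arr.length
  (PySem.List.pyRange 0 (n - k + 1) 1).foldl (fun maxi_xor i =>
    max maxi_xor ((PySem.List.pyRange i (i + k) 1).foldl
      (fun curr_xor j => PySem.Int.bxor curr_xor (PySem.List.pyGetD arr j 0)) 0)) 0

-- ===== PORT B =====
-- 'pre=[0]; for x in arr: pre.append(pre[-1]^x)' is List.scanl; 'zip(pre, pre[k:])' is zipWith with slice;
-- the zipped list is nonempty in the else-branch (k ≤ n), so max?'s .getD default is never used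
def maxSubarrayXOR_alt (arr : List Int) (k : Int) : Int :=
  let n : Int := arr.length
  if k ≤ 0 ∨ n < k then 0
  else
    let pre := arr.scanl PySem.Int.bxor 0
    let windows := List.zipWith PySem.Int.bxor pre (PySem.List.slice pre (some k) none)
    max 0 ((PySem.List.max? windows (fun y => y)).getD 0)

-- ===== PRECONDITION & SPEC =====
def Spec_maxSubarrayXOR (arr : List Int) (k : Int) (out : Int) : Prop := out = maxSubarrayXOR_alt arr k
instance (arr : List Int) (k : Int) (out : Int) : Decidable (Spec_maxSubarrayXOR arr k out) := by unfold Spec_maxSubarrayXOR; infer_instance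

-- ===== CLAIM (what is proved, stated in full; the proofs are below) =====
def Claim_equal_maxSubarrayXOR : Prop := ∀ (arr : List Int) (k : Int), Dom_maxSubarrayXOR arr k → Spec_maxSubarrayXOR arr k (maxSubarrayXOR arr k)

-- ===== LEMMAS AND PROOFS =====

theorem bxor_ofNat_ofNat (m n : Nat) :
    PySem.Int.bxor (Int.ofNat m) (Int.ofNat n) = Int.ofNat (m ^^^ n) := by
  simp [PySem.Int.bxor]

theorem bxor_ofNat_negSucc (m n : Nat) :
    PySem.Int.bxor (Int.ofNat m) (Int.negSucc n) = Int.negSucc (m ^^^ n) := by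
  simp [PySem.Int.bxor, Int.negSucc_eq]
  rw [if_neg (by omega)]
  ring

theorem bxor_negSucc_negSucc (m n : Nat) :
    PySem.Int.bxor (Int.negSucc m) (Int.negSucc n) = Int.ofNat (m ^^^ n) := by
  simp [PySem.Int.bxor, Int.negSucc_eq]
  rw [if_neg (by omega), if_neg (by omega)]

theorem bxor_negSucc_ofNat (m n : Nat) :
    PySem.Int.bxor (Int.negSucc m) (Int.ofNat n) = Int.negSucc (m ^^^ n) := by
  rw [PySem.Int.bxor_comm, bxor_ofNat_negSucc, Nat.xor_comm]

theorem bxor_assoc (a b c : Int) :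
    PySem.Int.bxor (PySem.Int.bxor a b) c = PySem.Int.bxor a (PySem.Int.bxor b c) := by
  cases a <;> cases b <;> cases c <;>
    simp only [bxor_ofNat_ofNat, bxor_ofNat_negSucc, bxor_negSucc_ofNat,
      bxor_negSucc_negSucc, Nat.xor_assoc]

theorem bxor_right_comm (a b c : Int) :
    PySem.Int.bxor (PySem.Int.bxor a b) c = PySem.Int.bxor (PySem.Int.bxor a c) b := by
  rw [bxor_assoc, PySem.Int.bxor_comm b c, ← bxor_assoc]

theorem scanl_getD_zero (l : List Int) (a : Int) :
    (l.scanl PySem.Int.bxor a).getD 0 0 = a := by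
  cases l <;> simp [List.scanl_nil, List.scanl_cons]

theorem scanl_getD_succ (l : List Int) : ∀ (a : Int) (t : Nat), t < l.length →
    (l.scanl PySem.Int.bxor a).getD (t + 1) 0
      = PySem.Int.bxor ((l.scanl PySem.Int.bxor a).getD t 0) (l.getD t 0) := by
  induction l with
  | nil => intro a t h; simp at h
  | cons x xs ih =>
    intro a t h
    cases t with
    | zero =>
      simp only [List.scanl_cons, List.getD_cons_succ, List.getD_cons_zero, scanl_getD_zero]
    | succ t =>
      simp only [List.scanl_cons, List.getD_cons_succ, List.length_cons] at *
      exact ih (PySem.Int.bxor a x) t (by omega)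

theorem window_xor (arr : List Int) (a : Nat) : ∀ (m : Nat), a + m ≤ arr.length →
    (PySem.List.pyRange (↑a) (↑a + ↑m) 1).foldl
      (fun c j => PySem.Int.bxor c (PySem.List.pyGetD arr j 0)) 0
    = PySem.Int.bxor ((arr.scanl PySem.Int.bxor 0).getD (a + m) 0)
        ((arr.scanl PySem.Int.bxor 0).getD a 0) := by
  intro m
  induction m with
  | zero =>
    intro _
    rw [show ((a:Int) + ((0:Nat):Int) = (a:Int)) by push_cast; ring,
      PySem.List.pyRange_one_eq_nil (le_refl _)]
    simp [PySem.Int.bxor_self]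
  | succ m ih =>
    intro h
    rw [show ((a:Int) + ((m+1:Nat):Int) = ((a:Int) + ((m:Nat):Int)) + 1) by push_cast; ring,
      PySem.List.pyRange_one_succ_right (by omega), List.foldl_append]
    simp only [List.foldl_cons, List.foldl_nil]
    rw [ih (by omega),
      show ((a:Int) + ((m:Nat):Int) = ((a + m : Nat) : Int)) by push_cast; ring,
      PySem.List.pyGetD_natCast,
      show a + (m + 1) = (a + m) + 1 by omega,
      scanl_getD_succ arr 0 (a + m) (by omega),
      bxor_right_comm]

theorem foldl_max_zero (l : List Int) :
    l.foldl (fun acc (_ : Int) => max acc (0 : Int)) 0 = 0 := by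
  induction l with
  | nil => rfl
  | cons x xs ih => simpa using ih

theorem foldl_max_pull (t : List Int) : ∀ (c x : Int),
    t.foldl max (max c x) = max c (t.foldl max x) := by
  induction t with
  | nil => intro c x; rfl
  | cons y ys ih =>
    intro c x
    simp only [List.foldl_cons, max_assoc]
    exact ih c (max x y)

-- ===== VERDICT (by name: the statement is the Claim_ definition above) =====
theorem maxSubarrayXOR_spec : Claim_equal_maxSubarrayXOR := by
  intro arr k _
  unfold Spec_maxSubarrayXOR maxSubarrayXOR maxSubarrayXOR_alt
  simp only []
  by_cases hk : k ≤ 0 ∨ (arr.length : Int) < k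
  · rw [if_pos hk]
    rcases hk with hk | hk
    · rw [PySem.List.foldl_congr_mem _ _ (fun acc (_ : Int) => max acc (0 : Int)) 0
        (by
          intro acc i _
          rw [PySem.List.pyRange_one_eq_nil (by omega : i + k ≤ i)]
          rfl)]
      exact foldl_max_zero _
    · rw [PySem.List.pyRange_one_eq_nil (by omega : (arr.length : Int) - k + 1 ≤ 0)]
      rfl
  · rw [if_neg hk]
    rw [not_or, not_le, not_lt] at hk
    obtain ⟨hk0, hkn⟩ := hk
    -- abbreviations
    set pre := arr.scanl PySem.Int.bxor 0 with hpre
    have hprelen : pre.length = arr.length + 1 := by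
      simp [hpre, List.length_scanl]
    have hkcast : k = ((k.toNat : Nat) : Int) := by omega
    -- B's slice is a drop
    have hslice : PySem.List.slice pre (some k) none = pre.drop k.toNat := by
      rw [hkcast]; exact PySem.List.slice_from_natCast pre k.toNat
    rw [hslice]
    -- the zipped list
    have hwslen : (List.zipWith PySem.Int.bxor pre (pre.drop k.toNat)).length
        = arr.length - k.toNat + 1 := by
      simp only [List.length_zipWith, List.length_drop, hprelen]
      omega
    -- A's loop is a foldl max over the mapped window values
    rw [show (fun (maxi_xor i : Int) =>
        max maxi_xor ((PySem.List.pyRange i (i + k) 1).foldl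
          (fun curr_xor j => PySem.Int.bxor curr_xor (PySem.List.pyGetD arr j 0)) 0))
      = (fun maxi_xor i => max maxi_xor ((fun i => (PySem.List.pyRange i (i + k) 1).foldl
          (fun curr_xor j => PySem.Int.bxor curr_xor (PySem.List.pyGetD arr j 0)) 0) i)) from rfl,
      ← List.foldl_map]
    -- the mapped list IS the zipped list
    have hmap : (PySem.List.pyRange 0 ((arr.length : Int) - k + 1) 1).map
        (fun i => (PySem.List.pyRange i (i + k) 1).foldl
          (fun curr_xor j => PySem.Int.bxor curr_xor (PySem.List.pyGetD arr j 0)) 0)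
        = List.zipWith PySem.Int.bxor pre (pre.drop k.toNat) := by
      apply List.ext_getElem
      · simp only [List.length_map, PySem.List.length_pyRange_one, hwslen]
        omega
      · intro t h1 h2
        have ht : t < arr.length - k.toNat + 1 := by rwa [hwslen] at h2
        have hpt : t < pre.length := by omega
        have hptk : t + k.toNat < pre.length := by omega
        simp only [List.getElem_map, PySem.List.getElem_pyRange_one, List.getElem_zipWith,
          List.getElem_drop]
        rw [show ((0 : Int) + (t : Nat) = ((t : Nat) : Int)) by ring,
          show (((t : Nat) : Int) + k = ((t : Nat) : Int) + ((k.toNat : Nat) : Int)) by omega]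
        rw [window_xor arr t k.toNat (by omega)]
        rw [List.getD_eq_getElem pre 0 (by omega : t + k.toNat < pre.length),
          List.getD_eq_getElem pre 0 hpt]
        rw [PySem.Int.bxor_comm]
        congr 2
        omega
    rw [hmap]
    -- the zipped list is nonempty; peel its head for max?
    cases hwsc : List.zipWith PySem.Int.bxor pre (pre.drop k.toNat) with
    | nil => rw [hwsc] at hwslen; simp at hwslen
    | cons w0 wt =>
      rw [PySem.List.max?_id_cons, Option.getD_some, List.foldl_cons]
      exact foldl_max_pull wt 0 w0
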